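-- pv_equiv track=rewrite | github.com/mdmoeller/uroborus | ex/numCombine/numCombine.py | reduceNum
-- ===== SOURCE A (Python) =====
-- def hasZero(num):
--     stringRep = str(num)
--     for x in range (0, len(stringRep)):
--         if(stringRep[x] == '0'):
--             return True
--
--     return False
--
-- def multCombine(num):
--     stringRep = str(num)
--     prod = 1
--     for x in range (0, len(stringRep)):
--         prod *= int(stringRep[x])
--
--     return prod
--
-- def addCombine(num):
--     stringRep = str(num)
--     sum = 0
--     for x in range (0, len(stringRep)):
--         sum += int(stringRep[x])
--
--     return sum
--
-- def reduceNum(num):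
--     result = 0
--     if(hasZero(num)):
--         result = addCombine(num)
--     else:
--         result = multCombine(num)
--
--     if(result < 10):
--         return result
--     else:
--         return reduceNum(result)
-- ===== SOURCE B (Python) =====
-- def reduceNum(num):
--     val = num
--     while True:
--         s = 0
--         p = 1
--         z = False
--         for ch in str(val):
--             d = int(ch)
--             s += d
--             p *= d
--             z = z or ch == '0'
--         val = s if z else p
--         if val < 10:
--             return val
-- ===== Notes on version B (the rewrite author's own statement) =====
-- stated objective: simpler
-- what changed: Replaced the recursion with three per-call string passes (hasZero, then addCombine or multCombine) by a single iterative while-loop that computes digit sum, digit product and the zero flag in one pass over the string.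
import Mathlib
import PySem

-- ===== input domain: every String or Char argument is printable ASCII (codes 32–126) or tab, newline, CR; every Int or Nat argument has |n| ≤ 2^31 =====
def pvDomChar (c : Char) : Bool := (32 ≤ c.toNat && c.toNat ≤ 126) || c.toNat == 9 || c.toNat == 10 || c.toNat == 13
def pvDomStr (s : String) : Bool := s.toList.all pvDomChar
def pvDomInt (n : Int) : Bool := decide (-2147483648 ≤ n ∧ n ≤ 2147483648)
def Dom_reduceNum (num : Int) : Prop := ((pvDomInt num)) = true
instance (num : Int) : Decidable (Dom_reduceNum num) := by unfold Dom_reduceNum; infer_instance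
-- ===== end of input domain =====

-- B replaces A's recursion and its three separate string passes per step by one iterative
-- loop doing a single combined pass per step (objective: simpler).
-- Both ports thread the same fuel bound (natAbs num + 1, ample since each reduction step
-- strictly decreases a value ≥ 10); where Python's int(ch) raises (the '-' of a negative
-- number), the ports use .getD 0 — such inputs are excluded by Pre_reduceNum.

-- ===== PORT A =====
-- int(stringRep[x]) : exact on Pre_ inputs; none (Python ValueError) is defaulted to 0, outside Pre_
def pvDigitA (cs : List Char) (x : Int) : Int :=
  (PySem.Int.ofChars? [PySem.List.pyGetD cs x ' ']).getD 0

-- 'for x in range(0, len(stringRep)): if stringRep[x] == '0': return True' with early return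
def pvHasZeroGo (cs : List Char) : List Int → Bool
  | [] => false
  | x :: xs => if PySem.List.pyGetD cs x ' ' == '0' then true else pvHasZeroGo cs xs

def pvHasZero (num : Int) : Bool :=
  let stringRep := PySem.Int.toChars num
  pvHasZeroGo stringRep (PySem.List.pyRange 0 (stringRep.length : Int) 1)

def pvMultCombine (num : Int) : Int :=
  let stringRep := PySem.Int.toChars num
  (PySem.List.pyRange 0 (stringRep.length : Int) 1).foldl
    (fun prod x => prod * pvDigitA stringRep x) 1

def pvAddCombine (num : Int) : Int :=
  let stringRep := PySem.Int.toChars num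
  (PySem.List.pyRange 0 (stringRep.length : Int) 1).foldl
    (fun sum x => sum + pvDigitA stringRep x) 0

def pvReduceGoA : Nat → Int → Int
  | 0, num => num
  | fuel + 1, num =>
    let result := if pvHasZero num then pvAddCombine num else pvMultCombine num
    if result < 10 then result else pvReduceGoA fuel result

def reduceNum (num : Int) : Int := pvReduceGoA (num.natAbs + 1) num

-- ===== PORT B =====
-- the single combined pass: running digit sum, digit product and zero flag
def pvScanB : List Char → Int → Int → Bool → Int × Int × Bool
  | [], s, p, z => (s, p, z)
  | c :: cs, s, p, z =>
    let d := (PySem.Int.ofChars? [c]).getD 0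
    pvScanB cs (s + d) (p * d) (z || c == '0')

def pvStepB (val : Int) : Int :=
  let r := pvScanB (PySem.Int.toChars val) 0 1 false
  if r.2.2 then r.1 else r.2.1

def pvReduceGoB : Nat → Int → Int
  | 0, val => val
  | fuel + 1, val =>
    let val' := pvStepB val
    if val' < 10 then val' else pvReduceGoB fuel val'

def reduceNum_alt (num : Int) : Int := pvReduceGoB (num.natAbs + 1) num

-- ===== PRECONDITION & SPEC =====
-- Pre_ excludes negative num, on which Python's int('-') raises ValueError in both A and B.
def Pre_reduceNum (num : Int) : Prop := 0 ≤ num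
instance (num : Int) : Decidable (Pre_reduceNum num) := by unfold Pre_reduceNum; infer_instance
def pvWitness_reduceNum : Int := 39

def Spec_reduceNum (num : Int) (out : Int) : Prop := out = reduceNum_alt num
instance (num : Int) (out : Int) : Decidable (Spec_reduceNum num out) := by unfold Spec_reduceNum; infer_instance

-- ===== CLAIM (what is proved, stated in full; the proofs are below) =====
def Claim_equal_reduceNum : Prop := ∀ (num : Int), Dom_reduceNum num → Pre_reduceNum num → Spec_reduceNum num (reduceNum num)

-- ===== LEMMAS AND PROOFS =====

def pvDigit (c : Char) : Int := (PySem.Int.ofChars? [c]).getD 0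

theorem pvHasZeroGo_eq_any (cs : List Char) (xs : List Int) :
    pvHasZeroGo cs xs = xs.any (fun x => PySem.List.pyGetD cs x ' ' == '0') := by
  induction xs with
  | nil => rfl
  | cons x xs ih =>
    simp only [pvHasZeroGo, List.any_cons, ih]
    split_ifs with h <;> simp [h]

theorem pvHasZero_eq (num : Int) :
    pvHasZero num = (PySem.Int.toChars num).any (fun c => c == '0') := by
  unfold pvHasZero
  rw [pvHasZeroGo_eq_any]
  rw [show ((fun x => PySem.List.pyGetD (PySem.Int.toChars num) x ' ' == '0')) =
        ((fun c => c == '0') ∘ fun x => PySem.List.pyGetD (PySem.Int.toChars num) x ' ') from rfl,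
    ← List.any_map, PySem.List.map_pyGetD_pyRange_zero']

theorem pvAddCombine_eq (num : Int) :
    pvAddCombine num = (PySem.Int.toChars num).foldl (fun s c => s + pvDigit c) 0 := by
  unfold pvAddCombine pvDigitA pvDigit
  exact PySem.List.foldl_pyRange_zero_pyGetD' (PySem.Int.toChars num) ' '
    (fun s c => s + (PySem.Int.ofChars? [c]).getD 0) 0

theorem pvMultCombine_eq (num : Int) :
    pvMultCombine num = (PySem.Int.toChars num).foldl (fun p c => p * pvDigit c) 1 := by
  unfold pvMultCombine pvDigitA pvDigit
  exact PySem.List.foldl_pyRange_zero_pyGetD' (PySem.Int.toChars num) ' '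
    (fun p c => p * (PySem.Int.ofChars? [c]).getD 0) 1

theorem pvScanB_eq (cs : List Char) (s p : Int) (z : Bool) :
    pvScanB cs s p z =
      (cs.foldl (fun s c => s + pvDigit c) s,
       cs.foldl (fun p c => p * pvDigit c) p,
       z || cs.any (fun c => c == '0')) := by
  induction cs generalizing s p z with
  | nil => simp [pvScanB]
  | cons c cs ih => simp [pvScanB, pvDigit, ih, Bool.or_assoc]

theorem step_eq (v : Int) :
    (if pvHasZero v then pvAddCombine v else pvMultCombine v) = pvStepB v := by
  unfold pvStepB
  rw [pvScanB_eq, pvHasZero_eq, pvAddCombine_eq, pvMultCombine_eq]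
  by_cases h : (PySem.Int.toChars v).any (fun c => c == '0') <;> simp [h]

theorem go_eq (fuel : Nat) (v : Int) : pvReduceGoA fuel v = pvReduceGoB fuel v := by
  induction fuel generalizing v with
  | zero => rfl
  | succ fuel ih =>
    simp only [pvReduceGoA, pvReduceGoB, step_eq]
    split_ifs <;> [rfl; exact ih _]

-- ===== VERDICT (by name: the statement is the Claim_ definition above) =====
theorem reduceNum_spec : Claim_equal_reduceNum := by
  intro num _ _
  unfold Spec_reduceNum reduceNum reduceNum_alt
  exact go_eq _ _
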